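-- pv_equiv track=rewrite | github.com/liuqiyucn/NV_Lab_Codes | Lab 1 Templates - With Measurement Tutorial Set/PulseBlasterUSB Driver and Introduction Documents/PulseBlasterUSB.py | List_Channels_Used
-- ===== SOURCE A (Python) =====
-- def List_Channels_Used(sequence):
--     #Gets largest combined channel number from the sequence, then converts to bionary, where the largest channel is nessisarily
--     #included in the largest number. length of the bionary number minus 1 gives the largest channel number.
--     max_chan_num = len(f"{max(sequence[0]):b}")-1
--     used_channels = [max_chan_num]
--     unused_channels = list(range(max_chan_num))
--     i = 0
--     #Gets a list of the channels that are used in the sequence.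
--     while len(unused_channels) != 0:
--         cur_channels = f"{sequence[0][i]:b}"
--         #Need this since the largest bionary diget of cur_channels is indexed at the 0th index, so we need to work backwards.
--         delete_val = []
--         length = len(f"{sequence[0][i]:b}") - 1
--         for j in list(range(len(unused_channels))):
--             #Doesn't bother checking if all channels are off in this step.
--             if sequence[0][i] == 0:
--                 break
--             if cur_channels[length - unused_channels[j]] == "1" and length-unused_channels[j] >= 0:
--                 used_channels += [int(unused_channels[j])]
--                 delete_val += [unused_channels[j]]
--         for val in delete_val:
--             unused_channels.remove(val)
--         i += 1
--         if i == len(sequence[0]):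
--             break
--     used_channels.sort()
--     return used_channels
-- ===== SOURCE B (Python) =====
-- def List_Channels_Used(sequence):
--     row = sequence[0]
--     max_chan = len(f"{max(row):b}") - 1
--     combined = 0
--     for flags in row:
--         combined |= abs(flags)
--     return [ch for ch in range(max_chan) if (combined >> ch) & 1] + [max_chan]
-- ===== Notes on version B (the rewrite author's own statement) =====
-- stated objective: alternative
-- what changed: B replaces A's per-element binary-string formatting, character scanning against an unused-channels list with deferred removals and a final sort by one bitwise OR of the row's absolute values followed by a single ascending scan of its bits below the top channel.
import Mathlib
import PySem

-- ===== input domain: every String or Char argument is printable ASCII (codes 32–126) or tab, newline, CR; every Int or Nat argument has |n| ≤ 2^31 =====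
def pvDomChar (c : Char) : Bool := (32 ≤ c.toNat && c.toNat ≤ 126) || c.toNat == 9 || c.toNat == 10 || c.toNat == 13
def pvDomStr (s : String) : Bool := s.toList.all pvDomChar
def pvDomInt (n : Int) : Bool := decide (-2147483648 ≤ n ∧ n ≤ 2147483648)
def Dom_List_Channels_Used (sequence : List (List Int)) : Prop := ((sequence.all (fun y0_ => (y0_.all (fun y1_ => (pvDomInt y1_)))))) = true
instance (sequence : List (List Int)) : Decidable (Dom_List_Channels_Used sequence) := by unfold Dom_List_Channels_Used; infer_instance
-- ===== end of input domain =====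

-- B replaces A's per-element binary-string scanning with unused/delete bookkeeping and a
-- final sort by one bitwise OR of the row's absolute values and a single ascending bit scan
-- (objective: alternative).

-- ===== PORT A =====
-- inner 'for j in ...' loop of A: returns (used_channels', delete_val)
def pvAInner (x : Int) (used unused : List Int) : List Int × List Int :=
  let cur := PySem.Int.toBinChars x
  let length : Int := PySem.List.len cur - 1
  unused.foldl (fun acc u =>
    if x = 0 then acc
    else if ((PySem.List.pyGet? cur (length - u)).getD ' ' = '1') ∧ 0 ≤ length - u then
      (acc.1 ++ [u], acc.2 ++ [u])
    else acc) (used, [])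

-- the 'while len(unused_channels) != 0' loop; i-advance = recursion over the remaining row
def pvALoop (rest used unused : List Int) : List Int :=
  if unused = [] then used
  else match rest with
    | [] => used
    | x :: rest' =>
      let r := pvAInner x used unused
      pvALoop rest' r.1 (r.2.foldl (fun us v => (PySem.List.remove? us v).getD us) unused)

def List_Channels_Used (sequence : List (List Int)) : List Int :=
  let row := (PySem.List.pyGet? sequence 0).getD []
  let mx := (PySem.List.max? row (fun x => x)).getD 0
  let max_chan_num : Int := PySem.List.len (PySem.Int.toBinChars mx) - 1
  PySem.List.sorted (pvALoop row [max_chan_num] (PySem.List.pyRange 0 max_chan_num 1)) (fun x => x) false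

-- ===== PORT B =====
def List_Channels_Used_alt (sequence : List (List Int)) : List Int :=
  let row := (PySem.List.pyGet? sequence 0).getD []
  let max_chan : Int :=
    PySem.List.len (PySem.Int.toBinChars ((PySem.List.max? row (fun x => x)).getD 0)) - 1
  let combined := row.foldl (fun acc flags => PySem.Int.bor acc ((flags.natAbs : Nat) : Int)) 0
  (PySem.List.pyRange 0 max_chan 1).filter
    (fun ch => decide (PySem.Int.band (combined >>> ch.toNat) 1 = 1)) ++ [max_chan]

-- ===== PRECONDITION & SPEC =====
-- closed-form condition for the IndexError A hits when a still-unused channel index u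
-- reaches past the left end of an element's (shorter) binary string
def pvMaxVal (row : List Int) : Int := row.foldl max (row.headD 0)
def pvTopChan (row : List Int) : Nat :=
  if pvMaxVal row < 0 then PySem.Int.bitLength (pvMaxVal row)
  else PySem.Int.bitLength (pvMaxVal row) - 1
def pvThr (x : Int) : Nat := 2 * PySem.Int.bitLength x + (if x < 0 then 2 else 0)
def pvCrash (row : List Int) : Prop :=
  ∃ i < row.length, ∃ u < pvTopChan row,
    row.getD i 0 ≠ 0 ∧ pvThr (row.getD i 0) ≤ u ∧ ∀ j < i, (row.getD j 0).natAbs.testBit u = false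

-- Pre_ excludes exactly the inputs where A raises: an empty sequence, an empty first row
-- (ValueError from max), and the pvCrash rows (IndexError).
def Pre_List_Channels_Used (sequence : List (List Int)) : Prop :=
  sequence ≠ [] ∧ sequence.headD [] ≠ [] ∧ ¬ pvCrash (sequence.headD [])
instance (sequence : List (List Int)) : Decidable (Pre_List_Channels_Used sequence) := by
  unfold Pre_List_Channels_Used pvCrash; infer_instance

def pvWitness_List_Channels_Used : List (List Int) := [[5, 2]]

def Spec_List_Channels_Used (sequence : List (List Int)) (out : List Int) : Prop :=
  out = List_Channels_Used_alt sequence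
instance (sequence : List (List Int)) (out : List Int) :
    Decidable (Spec_List_Channels_Used sequence out) := by
  unfold Spec_List_Channels_Used; infer_instance

-- ===== CLAIM (what is proved, stated in full; the proofs are below) =====
def Claim_equal_List_Channels_Used : Prop :=
  ∀ (sequence : List (List Int)), Dom_List_Channels_Used sequence →
    Pre_List_Channels_Used sequence →
    Spec_List_Channels_Used sequence (List_Channels_Used sequence)

-- ===== LEMMAS AND PROOFS =====

-- binary digits of n, most significant first, as Python's format(n, 'b') produces for n ≥ 0
def pvBin (n : Nat) : List Char :=
  if _h : n < 2 then [if n = 1 then '1' else '0']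
  else pvBin (n / 2) ++ [if n % 2 = 1 then '1' else '0']
termination_by n
decreasing_by omega
theorem pvBin_toDigitsCore (fuel : Nat) : ∀ (n : Nat) (acc : List Char), n < fuel →
    Nat.toDigitsCore 2 fuel n acc = pvBin n ++ acc := by
  induction fuel with
  | zero => intro n acc h; omega
  | succ f ih =>
    intro n acc h
    rw [Nat.toDigitsCore]
    by_cases h2 : n / 2 = 0
    · have hn2 : n < 2 := by omega
      simp only [h2, if_true]
      rw [pvBin, dif_pos hn2]
      have hd : Nat.digitChar (n % 2) = if n = 1 then '1' else '0' := by
        interval_cases n <;> decide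
      simp [hd]
    · simp only [if_neg h2]
      rw [ih (n/2) (Nat.digitChar (n % 2) :: acc) (by omega)]
      conv_rhs => rw [pvBin, dif_neg (show ¬ n < 2 by omega)]
      have hd : Nat.digitChar (n % 2) = if n % 2 = 1 then '1' else '0' := by
        rcases Nat.mod_two_eq_zero_or_one n with h'|h' <;> rw [h'] <;> decide
      simp [hd]

theorem toBinChars_nonneg (x : Int) (h : 0 ≤ x) :
    PySem.Int.toBinChars x = pvBin x.toNat := by
  unfold PySem.Int.toBinChars
  rw [if_neg (by omega), Nat.toDigits, pvBin_toDigitsCore _ _ _ (by omega), List.append_nil]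

theorem pvBin_lt_two {n : Nat} (h : n < 2) : pvBin n = [if n = 1 then '1' else '0'] := by
  rw [pvBin, dif_pos h]

theorem pvBin_two_le {n : Nat} (h : 2 ≤ n) :
    pvBin n = pvBin (n / 2) ++ [if n % 2 = 1 then '1' else '0'] := by
  rw [pvBin, dif_neg (by omega)]

theorem pvBin_length_pos (n : Nat) : 0 < (pvBin n).length := by
  by_cases h : n < 2
  · rw [pvBin_lt_two h]; simp
  · rw [pvBin_two_le (by omega)]; simp

theorem pvBin_getElem? (n k : Nat) (hk : k < (pvBin n).length) :
    (pvBin n)[(pvBin n).length - 1 - k]? = some (if n.testBit k then '1' else '0') := by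
  induction n using Nat.strong_induction_on generalizing k with
  | _ n ih =>
    by_cases h2 : n < 2
    · rw [pvBin_lt_two h2] at hk ⊢
      simp only [List.length_cons, List.length_nil] at hk
      interval_cases k
      interval_cases n <;> simp [Nat.testBit]
    · rw [pvBin_two_le (by omega)] at hk ⊢
      simp only [List.length_append, List.length_cons, List.length_nil] at hk ⊢
      have hL : 0 < (pvBin (n/2)).length := pvBin_length_pos _
      cases k with
      | zero =>
        have he : (pvBin (n/2)).length + 1 - 1 - 0 = (pvBin (n/2)).length := by omega
        rw [he, List.getElem?_append_right (by omega)]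
        simp [Nat.testBit_zero]
      | succ k' =>
        have hk' : k' < (pvBin (n/2)).length := by omega
        have he : (pvBin (n/2)).length + 1 - 1 - (k'+1) = (pvBin (n/2)).length - 1 - k' := by omega
        rw [he, List.getElem?_append_left (by omega)]
        rw [ih (n/2) (by omega) k' hk', Nat.testBit_add_one]

theorem pvBin_testBit_lt (n k : Nat) (h : n.testBit k = true) : k < (pvBin n).length := by
  induction n using Nat.strong_induction_on generalizing k with
  | _ n ih =>
    by_cases h2 : n < 2
    · rw [pvBin_lt_two h2]
      cases k with
      | zero => simp
      | succ k' =>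
        rw [Nat.testBit_add_one] at h
        have h0 : n / 2 = 0 := by omega
        rw [h0] at h; simp [Nat.zero_testBit] at h
    · rw [pvBin_two_le (by omega)]
      simp only [List.length_append, List.length_cons, List.length_nil]
      cases k with
      | zero => have := pvBin_length_pos (n/2); omega
      | succ k' =>
        rw [Nat.testBit_add_one] at h
        have := ih (n/2) (by omega) k' h
        omega

theorem toBinChars_neg (x : Int) (h : x < 0) :
    PySem.Int.toBinChars x = '-' :: pvBin x.natAbs := by
  unfold PySem.Int.toBinChars
  rw [if_pos h, Nat.toDigits, pvBin_toDigitsCore _ _ _ (by omega), List.append_nil]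

-- A's character test reads bit u of |x| (the '-' sign character never equals '1')
theorem pvCond_iff (x u : Int) (hu : 0 ≤ u) :
    ((((PySem.List.pyGet? (PySem.Int.toBinChars x)
        ((PySem.List.len (PySem.Int.toBinChars x) - 1) - u)).getD ' ' = '1') ∧
      0 ≤ PySem.List.len (PySem.Int.toBinChars x) - 1 - u)
    ↔ x.natAbs.testBit u.toNat = true) := by
  by_cases hx : 0 ≤ x
  · have hna : x.natAbs = x.toNat := by omega
    rw [hna, toBinChars_nonneg x hx, PySem.List.len_eq]
    set n := x.toNat with hn
    set L := (pvBin n).length with hL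
    have hL0 : 0 < L := pvBin_length_pos n
    by_cases hlt : u.toNat < L
    · have hnn : (0:Int) ≤ (L:Int) - 1 - u := by omega
      rw [PySem.List.pyGet?_of_nonneg _ hnn]
      have he : ((L:Int) - 1 - u).toNat = L - 1 - u.toNat := by omega
      rw [he, pvBin_getElem? n u.toNat hlt]
      constructor
      · rintro ⟨h1, -⟩
        by_contra hb
        simp only [Bool.not_eq_true] at hb
        rw [hb] at h1; simp at h1
      · intro hb; rw [hb]; exact ⟨by simp, hnn⟩
    · constructor
      · rintro ⟨-, h2⟩; omega
      · intro hb
        have := pvBin_testBit_lt n u.toNat hb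
        omega
  · rw [toBinChars_neg x (by omega), PySem.List.len_eq]
    set n' := x.natAbs with hn'
    set L' := (pvBin n').length with hL'
    have hL0 : 0 < L' := pvBin_length_pos n'
    simp only [List.length_cons]
    by_cases h1 : u.toNat < L'
    · have hnn : (0:Int) ≤ ((L' + 1 : Nat):Int) - 1 - u := by omega
      rw [PySem.List.pyGet?_of_nonneg _ hnn]
      have he : (((L' + 1 : Nat):Int) - 1 - u).toNat = (L' - 1 - u.toNat) + 1 := by omega
      rw [he, List.getElem?_cons_succ, pvBin_getElem? n' u.toNat h1]
      constructor
      · rintro ⟨hc, -⟩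
        by_contra hb
        simp only [Bool.not_eq_true] at hb
        rw [hb] at hc; simp at hc
      · intro hb; rw [hb]; exact ⟨by simp, hnn⟩
    · by_cases h2 : u.toNat = L'
      · have he0 : (((L' + 1 : Nat):Int) - 1 - u) = 0 := by omega
        rw [he0]
        constructor
        · rintro ⟨hc, -⟩
          rw [PySem.List.pyGet?_zero_cons] at hc
          simp at hc
        · intro hb
          have := pvBin_testBit_lt n' u.toNat hb
          omega
      · constructor
        · rintro ⟨-, hge⟩; omega
        · intro hb
          have := pvBin_testBit_lt n' u.toNat hb
          omega

theorem pvFoldl_pair_filter (c : Int → Bool) (l : List Int) : ∀ (u0 d0 : List Int),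
    l.foldl (fun acc u => if c u then (acc.1 ++ [u], acc.2 ++ [u]) else acc) (u0, d0)
      = (u0 ++ l.filter c, d0 ++ l.filter c) := by
  induction l with
  | nil => intro u0 d0; simp
  | cons a t ih =>
    intro u0 d0
    by_cases hc : c a
    · simp [hc, ih]
    · simp [hc, ih]

theorem pvAInner_eq (x : Int) (used unused : List Int)
    (hU : ∀ u ∈ unused, 0 ≤ u) :
    pvAInner x used unused
      = (used ++ unused.filter (fun u => x.natAbs.testBit u.toNat),
         unused.filter (fun u => x.natAbs.testBit u.toNat)) := by
  unfold pvAInner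
  by_cases hx0 : x = 0
  · subst hx0
    rw [PySem.List.foldl_congr_mem unused _ (fun acc _ => acc) _ (by intro acc u _; simp),
      PySem.List.foldl_ignore]
    have hz : ∀ u : Int, (0:Int).natAbs.testBit u.toNat = false := by
      intro u; simp [Nat.zero_testBit]
    simp [hz, List.filter_eq_nil_iff]
  · rw [PySem.List.foldl_congr_mem unused _
      (fun acc u => if x.natAbs.testBit u.toNat then (acc.1 ++ [u], acc.2 ++ [u]) else acc) _
      (by
        intro acc u hu
        rw [if_neg hx0]
        by_cases hb : x.natAbs.testBit u.toNat = true
        · rw [if_pos ((pvCond_iff x u (hU u hu)).2 hb)]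
          simp [hb]
        · rw [if_neg (fun hcond => hb ((pvCond_iff x u (hU u hu)).1 hcond))]
          simp only [Bool.not_eq_true] at hb
          simp [hb])]
    rw [pvFoldl_pair_filter]
    simp

theorem pvFoldl_remove_cons (dv : List Int) (a : Int) : ∀ (us : List Int), a ∉ dv →
    dv.foldl (fun us v => (PySem.List.remove? us v).getD us) (a :: us)
      = a :: dv.foldl (fun us v => (PySem.List.remove? us v).getD us) us := by
  induction dv with
  | nil => intro us _; rfl
  | cons v dv' ih =>
    intro us h
    have hv : v ≠ a := by rintro rfl; exact h (List.mem_cons_self ..)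
    simp only [List.foldl_cons]
    have hstep : (PySem.List.remove? (a :: us) v).getD (a :: us)
        = a :: (PySem.List.remove? us v).getD us := by
      rw [PySem.List.remove?_cons_of_ne us (fun he => hv he.symm)]
      cases PySem.List.remove? us v <;> rfl
    rw [hstep, ih ((PySem.List.remove? us v).getD us) (fun hm => h (List.mem_cons_of_mem _ hm))]

theorem pvFoldl_remove_filter (c : Int → Bool) : ∀ (us : List Int), us.Nodup →
    (us.filter c).foldl (fun us v => (PySem.List.remove? us v).getD us) us
      = us.filter (fun u => !c u) := by
  intro us
  induction us with
  | nil => intro _; rfl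
  | cons a t ih =>
    intro hnd
    have hat : a ∉ t := (List.nodup_cons.1 hnd).1
    have hnt : t.Nodup := (List.nodup_cons.1 hnd).2
    by_cases hc : c a
    · have h1 : List.filter c (a :: t) = a :: List.filter c t := by simp [hc]
      have h2 : List.filter (fun u => !c u) (a :: t) = List.filter (fun u => !c u) t := by
        simp [hc]
      rw [h1, h2, List.foldl_cons]
      rw [show (PySem.List.remove? (a :: t) a).getD (a :: t) = t by
        rw [PySem.List.remove?_cons_self a t]; rfl]
      exact ih hnt
    · have h1 : List.filter c (a :: t) = List.filter c t := by simp [hc]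
      have h2 : List.filter (fun u => !c u) (a :: t) = a :: List.filter (fun u => !c u) t := by
        simp [hc]
      rw [h1, h2, pvFoldl_remove_cons _ a t (fun hm => hat (List.mem_of_mem_filter hm)), ih hnt]

theorem pvFilter_or_perm {α : Type} (p q : α → Bool) (l : List α)
    (h : ∀ a ∈ l, ¬(p a = true ∧ q a = true)) :
    (l.filter p ++ l.filter q).Perm (l.filter (fun a => p a || q a)) := by
  induction l with
  | nil => simp
  | cons a t ih =>
    have ht : ∀ b ∈ t, ¬(p b = true ∧ q b = true) := fun b hb => h b (List.mem_cons_of_mem _ hb)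
    by_cases hp : p a
    · have hq : ¬ q a = true := fun hq => h a (List.mem_cons_self ..) ⟨hp, hq⟩
      have e1 : List.filter p (a :: t) = a :: List.filter p t := by simp [hp]
      have e2 : List.filter q (a :: t) = List.filter q t := by simp [hq]
      have e3 : List.filter (fun x => p x || q x) (a :: t)
          = a :: List.filter (fun x => p x || q x) t := by simp [hp]
      rw [e1, e2, e3, List.cons_append]
      exact (ih ht).cons a
    · have e1 : List.filter p (a :: t) = List.filter p t := by simp [hp]
      by_cases hq : q a
      · have e2 : List.filter q (a :: t) = a :: List.filter q t := by simp [hq]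
        have e3 : List.filter (fun x => p x || q x) (a :: t)
            = a :: List.filter (fun x => p x || q x) t := by simp [hp, hq]
        rw [e1, e2, e3]
        exact (List.perm_middle).trans ((ih ht).cons a)
      · have e2 : List.filter q (a :: t) = List.filter q t := by simp [hq]
        have e3 : List.filter (fun x => p x || q x) (a :: t)
            = List.filter (fun x => p x || q x) t := by simp [hp, hq]
        rw [e1, e2, e3]
        exact ih ht

def pvOrN (row : List Int) (a : Nat) : Nat := row.foldl (fun acc x => acc ||| x.natAbs) a

theorem pvOrN_testBit (row : List Int) : ∀ (a k : Nat),
    (pvOrN row a).testBit k = (a.testBit k || row.any (fun x => x.natAbs.testBit k)) := by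
  induction row with
  | nil => intro a k; simp [pvOrN]
  | cons x t ih =>
    intro a k
    show (pvOrN t (a ||| x.natAbs)).testBit k = _
    rw [ih]
    simp [Nat.testBit_or, Bool.or_assoc]

theorem pvBor_fold_cast (row : List Int) : ∀ (a : Nat),
    row.foldl (fun acc flags => PySem.Int.bor acc ((flags.natAbs : Nat) : Int)) ((a : Nat) : Int)
      = ((pvOrN row a : Nat) : Int) := by
  induction row with
  | nil => intro a; rfl
  | cons x t ih =>
    intro a
    show List.foldl _ (PySem.Int.bor ((a:Nat):Int) ((x.natAbs : Nat) : Int)) t = _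
    rw [PySem.Int.bor_natCast, ih (a ||| x.natAbs)]
    rfl

-- the unused_channels list still to be discovered, after the bits of o have been found
def pvU (m o : Nat) : List Int :=
  ((List.range m).filter (fun k => !o.testBit k)).map (fun k : Nat => (k : Int))

theorem pvU_nonneg (m o : Nat) : ∀ u ∈ pvU m o, 0 ≤ u := by
  intro u hu
  obtain ⟨k, -, rfl⟩ := List.mem_map.1 hu
  positivity

theorem pvU_nodup (m o : Nat) : (pvU m o).Nodup := by
  unfold pvU
  refine List.Nodup.map (fun a b h => ?_) (List.Nodup.filter _ List.nodup_range)
  exact_mod_cast h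

theorem pvU_filter (m o : Nat) (c : Nat → Bool) :
    (pvU m o).filter (fun u => c u.toNat)
      = ((List.range m).filter (fun k => !o.testBit k && c k)).map (fun k : Nat => (k : Int)) := by
  unfold pvU
  rw [List.filter_map]
  congr 1
  rw [List.filter_filter]
  apply List.filter_congr
  intro k hk
  simp [Function.comp, Bool.and_comm]

theorem pvALoop_perm (m : Nat) (rest : List Int) : ∀ (o : Nat) (used : List Int),
    (pvALoop rest used (pvU m o)).Perm
      (used ++ ((List.range m).filter
        (fun k => !o.testBit k && (pvOrN rest o).testBit k)).map (fun k : Nat => (k : Int))) := by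
  induction rest with
  | nil =>
    intro o used
    have he : ((List.range m).filter
        (fun k => !o.testBit k && (pvOrN [] o).testBit k)) = [] := by
      apply List.filter_eq_nil_iff.2
      intro k _
      show ¬(!o.testBit k && (pvOrN [] o).testBit k) = true
      simp [pvOrN]
    rw [he]
    simp only [List.map_nil, List.append_nil]
    unfold pvALoop
    split
    · exact List.Perm.refl _
    · exact List.Perm.refl _
  | cons x rest' ih =>
    intro o used
    by_cases hU : pvU m o = []
    · -- unused is empty: loop stops; every channel below m already has its bit in o
      have hall : ∀ k ∈ List.range m, o.testBit k = true := by
        intro k hk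
        by_contra hb
        have : (k : Int) ∈ pvU m o :=
          List.mem_map.2 ⟨k, List.mem_filter.2 ⟨hk, by simp [hb]⟩, rfl⟩
        simp [hU] at this
      have he : ((List.range m).filter
          (fun k => !o.testBit k && (pvOrN (x :: rest') o).testBit k)) = [] := by
        apply List.filter_eq_nil_iff.2
        intro k hk
        simp [hall k hk]
      rw [he]
      unfold pvALoop
      rw [if_pos hU]
      simp
    · unfold pvALoop
      rw [if_neg hU]
      simp only
      rw [pvAInner_eq x used (pvU m o) (pvU_nonneg m o)]
      simp only
      rw [pvFoldl_remove_filter _ (pvU m o) (pvU_nodup m o)]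
      have hdv : (pvU m o).filter (fun u => x.natAbs.testBit u.toNat)
          = ((List.range m).filter (fun k => !o.testBit k && x.natAbs.testBit k)).map
              (fun k : Nat => (k : Int)) := pvU_filter m o _
      have hun : (pvU m o).filter (fun u => !x.natAbs.testBit u.toNat)
          = pvU m (o ||| x.natAbs) := by
        rw [pvU_filter m o (fun k => !x.natAbs.testBit k)]
        unfold pvU
        congr 1
        apply List.filter_congr
        intro k hk
        simp [Nat.testBit_or]
      rw [hdv, hun]
      refine (ih (o ||| x.natAbs) _).trans ?_
      rw [List.append_assoc]
      apply List.Perm.append_left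
      rw [← List.map_append]
      apply List.Perm.map
      refine (pvFilter_or_perm _ _ (List.range m) ?_).trans ?_
      · rintro k - ⟨h1, h2⟩
        simp only [Bool.and_eq_true, Bool.not_eq_true'] at h1 h2
        rw [Nat.testBit_or, h1.1, h1.2] at h2
        simp at h2
      · have he : (List.range m).filter
            (fun k => (!o.testBit k && x.natAbs.testBit k) ||
                      (!(o ||| x.natAbs).testBit k && (pvOrN rest' (o ||| x.natAbs)).testBit k))
            = (List.range m).filter
            (fun k => !o.testBit k && (pvOrN (x :: rest') o).testBit k) := by
          apply List.filter_congr
          intro k _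
          have hr : pvOrN (x :: rest') o = pvOrN rest' (o ||| x.natAbs) := rfl
          rw [hr, pvOrN_testBit rest' (o ||| x.natAbs) k, Nat.testBit_or]
          cases o.testBit k <;> cases x.natAbs.testBit k <;>
            cases (rest'.any (fun y => y.toNat.testBit k)) <;> rfl
        rw [he]

-- ===== VERDICT (by name: the statement is the Claim_ definition above) =====
theorem pvTestBit_iff_and_one (n k : Nat) : n.testBit k = true ↔ (n >>> k) &&& 1 = 1 := by
  rw [Nat.testBit, Nat.and_comm 1, Nat.and_one_is_mod]
  rcases Nat.mod_two_eq_zero_or_one (n >>> k) with h | h <;> simp [h]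

theorem pvBListEq (NNi : Int) (NN bl : Nat) (hi : NNi = ((NN : Nat) : Int)) :
    (PySem.List.pyRange 0 (bl : Int)).filter
        (fun ch => decide (PySem.Int.band (NNi >>> ch.toNat) 1 = 1))
      = ((List.range bl).filter (fun k => NN.testBit k)).map (fun k : Nat => (k : Int)) := by
  subst hi
  rw [PySem.List.pyRange_zero_nat bl, List.filter_map]
  congr 1
  apply List.filter_congr
  intro k _
  simp only [Function.comp_apply, Int.toNat_natCast, Int.shiftRight_natCast]
  have hband : PySem.Int.band ((NN >>> k : Nat) : Int) 1 = (((NN >>> k) &&& 1 : Nat) : Int) := by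
    exact_mod_cast PySem.Int.band_natCast (NN >>> k) 1
  have hcast1 : (((NN >>> k) &&& 1 : Nat) : Int) = 1 ↔ (NN >>> k) &&& 1 = 1 := by
    exact_mod_cast Iff.rfl
  by_cases ht : NN.testBit k = true
  · simp [ht, ← Int.natCast_shiftRight, hband, (pvTestBit_iff_and_one NN k).1 ht]
  · simp only [Bool.not_eq_true] at ht
    have hne : ¬((NN >>> k) &&& 1 = 1) := fun hc => by
      rw [(pvTestBit_iff_and_one NN k).2 hc] at ht; cases ht
    simp [ht, ← Int.natCast_shiftRight, hband]
    have h2 : (NN >>> k) % 2 ≠ 1 := by rw [← Nat.and_one_is_mod]; exact hne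
    rcases Nat.mod_two_eq_zero_or_one (NN >>> k) with h3 | h3
    · exact Int.natCast_dvd_natCast.2 (Nat.dvd_of_mod_eq_zero h3)
    · exact absurd h3 h2

-- ===== VERDICT (by name: the statement is the Claim_ definition above) =====
theorem List_Channels_Used_spec : Claim_equal_List_Channels_Used := by
  intro seq hDom hPre
  obtain ⟨hne, hrow, -⟩ := hPre
  cases seq with
  | nil => exact absurd rfl hne
  | cons r t =>
  simp only [List.headD_cons] at hrow
  show List_Channels_Used (r :: t) = List_Channels_Used_alt (r :: t)
  unfold List_Channels_Used List_Channels_Used_alt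
  simp only [PySem.List.pyGet?_zero_cons, Option.getD_some]
  rcases hmx : PySem.List.max? r (fun x => x) with _ | mv
  · rw [PySem.List.max?_eq_none_iff] at hmx; exact absurd hmx hrow
  simp only [Option.getD_some]
  have hlen_pos : 0 < (PySem.Int.toBinChars mv).length := by
    by_cases h : 0 ≤ mv
    · rw [toBinChars_nonneg mv h]; exact pvBin_length_pos _
    · rw [toBinChars_neg mv (by omega)]; simp
  rw [PySem.List.len_eq]
  set M : Nat := (PySem.Int.toBinChars mv).length - 1 with hM
  have hcast : (((PySem.Int.toBinChars mv).length : Int) - 1) = (M : Int) := by omega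
  rw [hcast]
  have hRange : PySem.List.pyRange 0 (M:Int) 1 = pvU M 0 := by
    rw [PySem.List.pyRange_zero_nat M]
    unfold pvU
    rw [List.filter_eq_self.2 (by intro k _; simp [Nat.zero_testBit])]
  have hfold := pvBor_fold_cast r 0
  rw [show ((0:Nat):Int) = (0:Int) from rfl] at hfold
  rw [hfold]
  set NN := pvOrN r 0 with hNN
  rw [pvBListEq ((NN:Nat):Int) NN M rfl]
  rw [hRange]
  apply PySem.List.sorted_eq_of_perm_of_pairwise_lt
  · refine List.Perm.trans ?_ (pvALoop_perm M r 0 [(M:Int)]).symm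
    have hfc : (List.range M).filter (fun k => !(0:Nat).testBit k && (pvOrN r 0).testBit k)
        = (List.range M).filter (fun k => NN.testBit k) := by
      apply List.filter_congr
      intro k _
      simp [Nat.zero_testBit, hNN]
    rw [hfc, List.singleton_append]
    exact List.perm_append_comm
  · refine (List.pairwise_append).2 ⟨?_, List.pairwise_singleton _ _, ?_⟩
    · refine List.pairwise_map.2 ?_
      refine List.Pairwise.imp ?_ (List.Pairwise.filter _ List.pairwise_lt_range)
      intro a b hab
      exact_mod_cast hab
    · intro a ha b hb
      obtain ⟨k, hk, rfl⟩ := List.mem_map.1 ha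
      have hkM : k < M := List.mem_range.1 (List.mem_filter.1 hk).1
      rw [List.mem_singleton.1 hb]
      exact_mod_cast hkM
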